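-- pv_equiv track=rewrite | github.com/tyemirov/svg_tools | audio_to_text.py | remove_punctuation_from_transcript
-- ===== SOURCE A (Python) =====
-- import unicodedata
--
-- def remove_punctuation_from_transcript(text_value: str) -> str:
--     """Replace punctuation characters with spaces."""
--     replaced: list[str] = []
--     for character in text_value:
--         if unicodedata.category(character).startswith("P"):
--             replaced.append(" ")
--         else:
--             replaced.append(character)
--     return "".join(replaced)
-- ===== SOURCE B (Python) =====
-- import unicodedata
--
-- def remove_punctuation_from_transcript(text_value: str) -> str:
--     """Replace punctuation characters with spaces."""
--     table = {ord(c): " " for c in set(text_value)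
--              if unicodedata.category(c).startswith("P")}
--     return text_value.translate(table)
-- ===== Notes on version B (the rewrite author's own statement) =====
-- stated objective: faster
-- what changed: B classifies only the distinct characters of the input to build an ord-to-space translation table, then substitutes in one str.translate call, replacing A's per-character category test and append loop.
import Mathlib
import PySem

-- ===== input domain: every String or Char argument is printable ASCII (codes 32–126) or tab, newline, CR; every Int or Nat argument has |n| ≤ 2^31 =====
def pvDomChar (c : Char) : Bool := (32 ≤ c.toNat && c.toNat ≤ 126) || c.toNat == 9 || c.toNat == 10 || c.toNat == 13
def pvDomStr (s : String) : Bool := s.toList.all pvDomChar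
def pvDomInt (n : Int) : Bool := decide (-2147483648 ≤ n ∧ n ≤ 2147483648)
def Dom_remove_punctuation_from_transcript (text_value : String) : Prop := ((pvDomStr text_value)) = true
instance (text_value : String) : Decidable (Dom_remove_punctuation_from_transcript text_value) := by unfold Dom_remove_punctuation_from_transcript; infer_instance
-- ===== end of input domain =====

-- B replaces A's per-character category-test-and-append loop by building an
-- ord->" " translation table from the DISTINCT characters of the input and then
-- substituting via str.translate (idiomatic two-phase rewrite, same result).

-- unicodedata.category(c).startswith("P"): exact on Dom (printable ASCII + tab/newline/CR),
-- where the category-P characters are exactly these 23 ASCII punctuation characters.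
def pvCatP (c : Char) : Bool := ("!\"#%&'()*,-./:;?@[\\]_{}".toList).contains c

-- ===== PORT A =====
def remove_punctuation_from_transcript (text_value : String) : String :=
  let replaced : List String :=
    text_value.toList.foldl
      (fun acc character =>
        acc ++ [if pvCatP character then " " else String.mk [character]]) []
  PySem.Str.join "" replaced

-- ===== PORT B =====
def remove_punctuation_from_transcript_alt (text_value : String) : String :=
  let table : PySem.Dict Int String :=
    ((PySem.Set.ofList text_value.toList).filter (fun c => pvCatP c)).foldl
      (fun d c => d.insert ((c.toNat : Int)) " ") PySem.Dict.empty
  -- str.translate: each character whose ord is a key is replaced by the table value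
  PySem.Str.join ""
    (text_value.toList.map (fun c => table.getD ((c.toNat : Int)) (String.mk [c])))

-- ===== PRECONDITION & SPEC =====
def Spec_remove_punctuation_from_transcript (text_value : String) (out : String) : Prop := out = remove_punctuation_from_transcript_alt text_value
instance (text_value : String) (out : String) : Decidable (Spec_remove_punctuation_from_transcript text_value out) := by unfold Spec_remove_punctuation_from_transcript; infer_instance

-- ===== CLAIM (what is proved, stated in full; the proofs are below) =====
def Claim_equal_remove_punctuation_from_transcript : Prop := ∀ (text_value : String), Dom_remove_punctuation_from_transcript text_value → Spec_remove_punctuation_from_transcript text_value (remove_punctuation_from_transcript text_value)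

-- ===== LEMMAS AND PROOFS =====

theorem pv_foldl_append_map {α β : Type} (f : α → β) :
    ∀ (L : List α) (acc : List β),
      L.foldl (fun acc c => acc ++ [f c]) acc = acc ++ L.map f := by
  intro L
  induction L with
  | nil => simp
  | cons x xs ih => intro acc; simp [List.foldl, ih]

theorem pv_tbl_get (L : List Char) (k : Int) :
    ∀ (d : PySem.Dict Int String),
      (L.foldl (fun d c => d.insert ((c.toNat : Int)) " ") d).get? k
        = if k ∈ L.map (fun c => ((c.toNat : Int))) then some " " else d.get? k := by
  induction L with
  | nil => simp
  | cons x xs ih =>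
    intro d
    simp only [List.foldl, ih, List.map_cons, List.mem_cons]
    rw [PySem.Dict.get?_insert]
    by_cases hx : k = ((x.toNat : Int))
    · simp [hx]
    · simp [hx]

theorem pv_char_eq_of_ord (c c' : Char) (h : ((c.toNat : Int)) = ((c'.toNat : Int))) : c = c' := by
  have : c.toNat = c'.toNat := by exact_mod_cast h
  exact Char.ext (UInt32.toNat_inj.mp this)

theorem remove_punctuation_from_transcript_spec : Claim_equal_remove_punctuation_from_transcript := by
  intro text_value _
  unfold Spec_remove_punctuation_from_transcript
  unfold remove_punctuation_from_transcript remove_punctuation_from_transcript_alt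
  simp only []
  rw [pv_foldl_append_map]
  simp only [List.nil_append]
  congr 1
  apply List.map_congr_left
  intro c hc
  have hget := pv_tbl_get
    (((PySem.Set.ofList text_value.toList).filter (fun c => pvCatP c))) ((c.toNat : Int))
    PySem.Dict.empty
  have hmem : ((c.toNat : Int)) ∈
      (((PySem.Set.ofList text_value.toList).filter (fun c => pvCatP c)).map
        (fun c => ((c.toNat : Int)))) ↔ pvCatP c = true := by
    constructor
    · intro h
      rcases List.mem_map.mp h with ⟨c', hc', he⟩
      have := pv_char_eq_of_ord c' c he
      subst this
      exact (List.mem_filter.mp hc').2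
    · intro h
      exact List.mem_map.mpr ⟨c, List.mem_filter.mpr
        ⟨(PySem.Set.mem_ofList _ _).mpr hc, h⟩, rfl⟩
  by_cases hp : pvCatP c = true
  · have : (((PySem.Set.ofList text_value.toList).filter (fun c => pvCatP c)).foldl
        (fun d c => d.insert ((c.toNat : Int)) " ") PySem.Dict.empty).get? ((c.toNat : Int))
        = some " " := by rw [hget]; simp [hmem.mpr hp]
    simp [hp, PySem.Dict.getD, this]
  · have : (((PySem.Set.ofList text_value.toList).filter (fun c => pvCatP c)).foldl
        (fun d c => d.insert ((c.toNat : Int)) " ") PySem.Dict.empty).get? ((c.toNat : Int))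
        = none := by
      rw [hget]
      have : ¬ ((c.toNat : Int)) ∈
          (((PySem.Set.ofList text_value.toList).filter (fun c => pvCatP c)).map
            (fun c => ((c.toNat : Int)))) := fun h => hp (hmem.mp h)
      simp [this, PySem.Dict.get?_empty]
    simp [hp, PySem.Dict.getD, this]
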